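-- pv_equiv track=rewrite | github.com/Lukas2357/ProSRL | pysrl/preparer/prep_help_fcts.py | get_type_idx
-- ===== SOURCE A (Python) =====
-- def get_type_idx(pages: dict) -> list:
--     """Get indices of learn pages where the Type of pages changes
--
--     Args:
--         pages (dict): The dictionary of all sorted learn pages
--
--     Returns:
--         list: List of indices where the Type changes (for coloring in plot)
--
--     """
--     ltype, type_idx = '', []
--
--     for idx, page in enumerate(pages.values()):
--         if page['Type'] != ltype:
--             ltype = page['Type']
--             type_idx.append(idx)
--
--     type_idx = type_idx + [len(pages)]
--
--     return type_idx
-- ===== SOURCE B (Python) =====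
-- def get_type_idx(pages: dict) -> list:
--     """Run-boundary version: measure each maximal run of equal Type with an
--     inner scan and jump run by run, instead of comparing every page with the
--     last seen type."""
--     types = [p['Type'] for p in pages.values()]
--     out, idx, prev = [], 0, ''
--     while types:
--         t = types[0]
--         j = 1
--         while j < len(types) and types[j] == t:
--             j += 1
--         if t != prev:
--             out.append(idx)
--         prev = t
--         idx += j
--         types = types[j:]
--     return out + [len(pages)]
-- ===== Notes on version B (the rewrite author's own statement) =====
-- stated objective: alternative
-- what changed: Replaces A's per-element last-type comparison with groupby-style run-boundary detection: an inner scan measures each maximal run of equal Type and the outer loop consumes the list run by run, appending the run's start offset only when its type differs from the previous run's (empty-string sentinel for the first).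
import Mathlib
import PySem

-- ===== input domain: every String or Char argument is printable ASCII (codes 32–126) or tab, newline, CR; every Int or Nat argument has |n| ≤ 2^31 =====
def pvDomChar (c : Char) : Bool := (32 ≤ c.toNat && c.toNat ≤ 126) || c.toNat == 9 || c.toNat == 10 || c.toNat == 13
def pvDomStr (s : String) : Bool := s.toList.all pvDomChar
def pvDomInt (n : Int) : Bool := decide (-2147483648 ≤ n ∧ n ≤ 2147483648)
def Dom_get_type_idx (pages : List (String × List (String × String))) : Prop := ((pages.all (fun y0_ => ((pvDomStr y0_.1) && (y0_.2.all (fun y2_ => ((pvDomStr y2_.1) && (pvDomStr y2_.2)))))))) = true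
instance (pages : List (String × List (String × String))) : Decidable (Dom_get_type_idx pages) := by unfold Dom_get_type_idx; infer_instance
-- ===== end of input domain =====

-- B replaces A's per-element last-type comparison by run-boundary detection:
-- an inner scan measures each maximal run of equal Type and the outer loop
-- consumes the list run by run; equivalence is proved on inputs where every
-- page carries a 'Type' key (Python A raises KeyError otherwise).

-- ===== PORT A =====
-- page['Type'] : first match in the association list; Pre_ guarantees it exists,
-- so the total form .getD "" is exact on admitted inputs.
def get_type_idx (pages : List (String × List (String × String))) : List Int :=
  let st := (PySem.List.enumerate (pages.map (·.2)) 0).foldl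
    (fun (s : String × List Int) ip =>
      let t := (List.lookup "Type" ip.2).getD ""
      if t ≠ s.1 then (t, s.2 ++ [ip.1]) else s) ("", [])
  st.2 ++ [(pages.length : Int)]

-- ===== PORT B =====
-- inner `while j < len(types) and types[j] == t`: counts the leading elements
-- of the tail equal to t (j starts at 1, types[0] = t)
def countLead (t : String) : List String → Nat
  | [] => 0
  | x :: xs => if x = t then countLead t xs + 1 else 0

-- outer `while types:` loop with state (out, idx, prev); types := types[j:]
def altLoop (types : List String) (out : List Int) (idx : Int) (prev : String) : List Int :=
  match types with
  | [] => out
  | t :: rest =>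
    let j := countLead t rest + 1
    let out' := if t ≠ prev then out ++ [idx] else out
    altLoop (rest.drop (j - 1)) out' (idx + (j : Int)) t
termination_by types.length
decreasing_by simp

def get_type_idx_alt (pages : List (String × List (String × String))) : List Int :=
  let types := pages.map (fun p => (List.lookup "Type" p.2).getD "")
  altLoop types [] 0 "" ++ [(pages.length : Int)]

-- ===== PRECONDITION & SPEC =====
-- Pre_ excludes exactly the inputs where some page lacks a 'Type' key: Python A raises KeyError there.
def Pre_get_type_idx (pages : List (String × List (String × String))) : Prop :=
  ∀ p ∈ pages, (List.lookup "Type" p.2).isSome = true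
instance (pages : List (String × List (String × String))) : Decidable (Pre_get_type_idx pages) := by unfold Pre_get_type_idx; infer_instance

def pvWitness_get_type_idx : (List (String × List (String × String))) :=
  [("p1", [("Type", "quiz")]), ("p2", [("Type", "text")]), ("p3", [("Type", "text")])]

def Spec_get_type_idx (pages : List (String × List (String × String))) (out : List Int) : Prop := out = get_type_idx_alt pages
instance (pages : List (String × List (String × String))) (out : List Int) : Decidable (Spec_get_type_idx pages out) := by unfold Spec_get_type_idx; infer_instance

-- ===== CLAIM (what is proved, stated in full; the proofs are below) =====
def Claim_equal_get_type_idx : Prop := ∀ (pages : List (String × List (String × String))), Dom_get_type_idx pages → Pre_get_type_idx pages → Spec_get_type_idx pages (get_type_idx pages)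

-- ===== LEMMAS AND PROOFS =====

-- A's loop step, over an already-extracted type
def aStep (s : String × List Int) (ip : Int × String) : String × List Int :=
  if ip.2 ≠ s.1 then (ip.2, s.2 ++ [ip.1]) else s

-- A's fold with in-loop extraction g equals the plain fold over the mapped list
theorem fold_map {α : Type} (g : α → String) (xs : List α) :
    ∀ (s : Int) (st : String × List Int),
    (PySem.List.enumerate xs s).foldl
      (fun st ip => let t := g ip.2; if t ≠ st.1 then (t, st.2 ++ [ip.1]) else st) st
    = (PySem.List.enumerate (xs.map g) s).foldl aStep st := by
  induction xs with
  | nil => intro s st; simp [PySem.List.enumerate_nil]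
  | cons x xs ih =>
    intro s st
    rw [List.map_cons, PySem.List.enumerate_cons, PySem.List.enumerate_cons,
      List.foldl_cons, List.foldl_cons, ih]
    rfl

-- folding A's step over a leading run of elements equal to the carried type is a no-op
theorem skip_run (t : String) (xs : List String) :
    ∀ (s : Int) (acc : List Int),
    (PySem.List.enumerate xs s).foldl aStep (t, acc)
    = (PySem.List.enumerate (xs.drop (countLead t xs)) (s + (countLead t xs : Int))).foldl aStep (t, acc) := by
  induction xs with
  | nil => intro s acc; simp [countLead]
  | cons x xs ih =>
    intro s acc
    by_cases h : x = t
    · rw [PySem.List.enumerate_cons, List.foldl_cons]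
      have hc : countLead t (x :: xs) = countLead t xs + 1 := by simp [countLead, h]
      have hstep : aStep (t, acc) (s, x) = (t, acc) := by simp [aStep, h]
      have hs : s + ((countLead t xs + 1 : Nat) : Int) = s + 1 + ((countLead t xs : Nat) : Int) := by
        push_cast; ring
      rw [hstep, ih (s + 1) acc, hc, List.drop_succ_cons, hs]
    · simp [countLead, h]

-- A's fold computes exactly B's run-by-run loop
theorem main_loop (types : List String) (acc : List Int) (s : Int) (prev : String) :
    ((PySem.List.enumerate types s).foldl aStep (prev, acc)).2 = altLoop types acc s prev := by
  induction types, acc, s, prev using altLoop.induct with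
  | case1 acc s prev => simp [altLoop, PySem.List.enumerate_nil]
  | case2 acc s prev t rest j out' ih =>
    rw [PySem.List.enumerate_cons, List.foldl_cons]
    have hstate : aStep (prev, acc) (s, t) = (t, out') := by
      by_cases h : t = prev
      · subst h; simp_all [aStep, out']
      · simp_all [aStep, out']
    have hdrop : List.drop (countLead t rest) rest = List.drop (j - 1) rest := by simp [j]
    have hidx : s + 1 + ((countLead t rest : Nat) : Int) = s + (j : Int) := by
      simp [j]; ring
    rw [hstate, skip_run t rest (s + 1) out', hdrop, hidx, ih]
    simp only [altLoop]
    simp [j, out']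

-- ===== VERDICT (by name: the statement is the Claim_ definition above) =====
theorem get_type_idx_spec : Claim_equal_get_type_idx := by
  intro pages _ _
  unfold Spec_get_type_idx
  simp only [get_type_idx, get_type_idx_alt]
  rw [fold_map (fun p => (List.lookup "Type" p).getD "") (pages.map (·.2)) 0 ("", []),
    List.map_map, main_loop]
  simp [Function.comp_def]
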